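-- pv_equiv track=rewrite | github.com/davidwatts117/AoC2025 | 03-2.py | pick_largest_comb
-- ===== SOURCE A (Python) =====
-- def pick_largest_comb(bank):
--     result = ""
--     start = 0
--     for i in range(12):
--         rem = 12 - i - 1
--         end = len(bank) - rem
--         avail = bank[start:end]
--         big = max(avail)
--         idx = avail.index(big)
--         result += big
--         start += idx + 1
--     return result
-- ===== SOURCE B (Python) =====
-- def pick_largest_comb(bank):
--     if len(bank) < 12:
--         raise ValueError("need at least 12 entries to pick 12")
--     stack = []
--     r = len(bank)  # items remaining, counting the current one
--     for c in bank:
--         while stack and stack[-1] < c and len(stack) - 1 + r >= 12: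
--             stack.pop()
--         stack.append(c)
--         r -= 1
--     return ''.join(stack[:12])
-- ===== Notes on version B (the rewrite author's own statement) =====
-- stated objective: alternative
-- what changed: Replaces A's 12 repeated max()+index() scans over shrinking slices by the standard single-pass monotonic-stack algorithm for the lexicographically largest length-12 subsequence.
import Mathlib
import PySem

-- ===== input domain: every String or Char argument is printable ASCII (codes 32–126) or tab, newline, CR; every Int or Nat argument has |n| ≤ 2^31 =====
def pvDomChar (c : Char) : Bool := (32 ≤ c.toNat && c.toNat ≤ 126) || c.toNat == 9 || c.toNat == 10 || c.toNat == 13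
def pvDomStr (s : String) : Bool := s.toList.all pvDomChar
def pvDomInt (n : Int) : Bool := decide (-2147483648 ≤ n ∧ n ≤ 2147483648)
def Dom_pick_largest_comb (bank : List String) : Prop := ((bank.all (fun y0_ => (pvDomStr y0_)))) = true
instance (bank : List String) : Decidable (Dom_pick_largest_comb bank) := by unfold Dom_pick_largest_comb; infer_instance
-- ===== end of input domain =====

-- B replaces A's 12 repeated max-scans over shrinking slices by the standard single-pass
-- monotonic-stack algorithm for the largest length-12 subsequence (alternative algorithm, same result).


-- ===== PORT A =====
-- literal port of A's loop body; max()/list.index() are total here because Pre_ makes every slice nonempty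
def pvStepA (bank : List String) (st : String × Int) (i : Int) : String × Int :=
  let result := st.1
  let start := st.2
  let rem : Int := 12 - i - 1
  let e : Int := (bank.length : Int) - rem
  let avail := PySem.List.slice bank (some start) (some e)
  let big := (PySem.List.max? avail (fun y => y)).getD ""
  let idx : Nat := (PySem.List.index? avail big).getD 0
  (result ++ big, start + (idx : Int) + 1)

def pick_largest_comb (bank : List String) : String :=
  ((PySem.List.pyRange 0 12 1).foldl (pvStepA bank) ("", 0)).1

-- ===== PORT B =====
-- Source B's guard (raise ValueError on fewer than 12 strings) has no value to port: Pre_ excludes those inputs.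
-- The stack is kept top-first (Python appends and pops at the END of its list),
-- so the final `stack[:12]` is `reverse.take 12`; `r` counts the items remaining as in Source B
def pvPopB (c : String) (r : Nat) (stack : List String) : List String :=
  match stack with
  | [] => []
  | t :: s => if t < c ∧ 12 ≤ s.length + r then pvPopB c r s else t :: s

def pvScanB (stack : List String) (rest : List String) : List String :=
  match rest with
  | [] => stack
  | c :: cs => pvScanB (c :: pvPopB c (cs.length + 1) stack) cs

def pick_largest_comb_alt (bank : List String) : String :=
  PySem.Str.join "" ((pvScanB [] bank).reverse.take 12)

-- ===== PRECONDITION & SPEC =====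
-- A raises ValueError (max of an empty slice) exactly when fewer than 12 strings are given
def Pre_pick_largest_comb (bank : List String) : Prop := 12 ≤ bank.length
instance (bank : List String) : Decidable (Pre_pick_largest_comb bank) := by unfold Pre_pick_largest_comb; infer_instance
def pvWitness_pick_largest_comb : List String :=
  ["a", "b", "c", "d", "e", "f", "g", "h", "i", "j", "k", "l"]

def Spec_pick_largest_comb (bank : List String) (out : String) : Prop := out = pick_largest_comb_alt bank
instance (bank : List String) (out : String) : Decidable (Spec_pick_largest_comb bank out) := by unfold Spec_pick_largest_comb; infer_instance

-- ===== CLAIM (what is proved, stated in full; the proofs are below) =====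
def Claim_equal_pick_largest_comb : Prop := ∀ (bank : List String), Dom_pick_largest_comb bank → Pre_pick_largest_comb bank → Spec_pick_largest_comb bank (pick_largest_comb bank)

-- ===== LEMMAS AND PROOFS =====

-- the common greedy specification: p picks, each the first maximum of the window that leaves enough behind
def pvWin (q : Nat) (xs : List String) : List String := xs.take (xs.length - q)
def pvBig (q : Nat) (xs : List String) : String := (PySem.List.max? (pvWin q xs) (fun y => y)).getD ""
def pvIdx (q : Nat) (xs : List String) : Nat := (PySem.List.index? (pvWin q xs) (pvBig q xs)).getD 0

def pvGreedy (p : Nat) (xs : List String) : List String :=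
  match p with
  | 0 => []
  | Nat.succ q => pvBig q xs :: pvGreedy q (xs.drop (pvIdx q xs + 1))

theorem pvJoin_cons (m : String) (l : List String) :
    PySem.Str.join "" (m :: l) = m ++ PySem.Str.join "" l := by
  simp only [PySem.Str.join]
  apply String.toList_inj.mp
  cases l with
  | nil => simp [PySem.Chars.join_singleton, PySem.Chars.join_nil]
  | cons b t =>
    simp only [String.toList_append, String.toList_ofList, List.map_cons,
      show ("".toList) = ([] : List Char) from rfl, PySem.Chars.join_cons_cons]
    simp

-- everything the greedy pick gives us: position, maximality over the window, strictness before it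
theorem pvPick (q : Nat) (xs : List String) (hq : q < xs.length) :
    pvIdx q xs < xs.length - q ∧
    (∀ t (ht : t < xs.length - q), xs[t]'(by omega) ≤ pvBig q xs) ∧
    (∀ h : pvIdx q xs < xs.length, xs[pvIdx q xs]'h = pvBig q xs) ∧
    (∀ j (_hj1 : j < pvIdx q xs) (hj2 : j < xs.length), xs[j]'hj2 < pvBig q xs) := by
  have hw : (pvWin q xs).length = xs.length - q := by
    simp [pvWin]
  have hne : pvWin q xs ≠ [] := by
    intro h; rw [h] at hw; simp at hw; omega
  obtain ⟨M, hM⟩ : ∃ M, PySem.List.max? (pvWin q xs) (fun y => y) = some M := by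
    cases h : PySem.List.max? (pvWin q xs) (fun y => y) with
    | none => exact absurd ((PySem.List.max?_eq_none_iff _ _).mp h) hne
    | some M => exact ⟨M, rfl⟩
  have hbig : pvBig q xs = M := by simp [pvBig, hM]
  have hmax : ∀ y ∈ pvWin q xs, y ≤ M := by
    intro y hy; exact PySem.List.max?_isMax hM y hy
  obtain ⟨k, hk⟩ : ∃ k, PySem.List.index? (pvWin q xs) M = some k := by
    cases h : PySem.List.index? (pvWin q xs) M with
    | none =>
      exact absurd (PySem.List.max?_mem hM)
        ((PySem.List.index?_eq_none_iff _ _).mp h)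
    | some k => exact ⟨k, rfl⟩
  obtain ⟨hklen, hkeq, hkfst⟩ := PySem.List.getElem_of_index?_eq_some hk
  have hidx : pvIdx q xs = k := by
    rw [PySem.List.index?_eq_idxOf?] at hk
    simp [pvIdx, hbig, hk]
  have hwget : ∀ t (ht : t < xs.length - q), (pvWin q xs)[t]'(by omega) = xs[t]'(by omega) := by
    intro t ht
    simp [pvWin, List.getElem_take]
  refine ⟨by omega, ?_, ?_, ?_⟩
  · intro t ht
    rw [hbig, ← hwget t ht]
    exact hmax _ (List.getElem_mem _)
  · intro h
    have hx : (pvWin q xs)[k]'(by omega) = xs[k]'(by omega) := hwget k (by omega)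
    rw [hbig]
    simp only [hidx]
    rw [← hx]
    exact hkeq
  · intro j hj1 hj2
    rw [hidx] at hj1
    rw [hbig, ← hwget j (by omega)]
    exact lt_of_le_of_ne (hmax _ (List.getElem_mem _)) (hkfst j hj1)

-- pvPopB never reaches below a blocked stack bottom
theorem pvPop_protect (U B : List String) (c : String) (r : Nat)
    (hB : ∀ b B', B = b :: B' → ¬ b < c) :
    ∃ U', (∀ u ∈ U', u ∈ U) ∧ pvPopB c r (U ++ B) = U' ++ B := by
  induction U with
  | nil =>
    refine ⟨[], by simp, ?_⟩
    cases B with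
    | nil => rfl
    | cons b B' =>
      simp only [List.nil_append, pvPopB]
      rw [if_neg (by intro h; exact hB b B' rfl h.1)]
  | cons u U ih =>
    simp only [List.cons_append, pvPopB]
    by_cases h : u < c ∧ 12 ≤ (U ++ B).length + r
    · rw [if_pos h]
      obtain ⟨U', hsub, he⟩ := ih
      exact ⟨U', fun x hx => List.mem_cons_of_mem u (hsub x hx), he⟩
    · rw [if_neg h]
      exact ⟨u :: U, fun x hx => hx, rfl⟩

-- pvPopB pops everything above a blocked bottom when budget allows
theorem pvPop_all (U B : List String) (c : String) (r : Nat)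
    (hU : ∀ u ∈ U, u < c) (hr : 12 ≤ B.length + r)
    (hB : ∀ b B', B = b :: B' → ¬ (b < c ∧ 12 ≤ B'.length + r)) :
    pvPopB c r (U ++ B) = B := by
  induction U with
  | nil =>
    cases B with
    | nil => rfl
    | cons b B' =>
      simp only [List.nil_append, pvPopB]
      rw [if_neg (by intro h; exact hB b B' rfl ⟨h.1, h.2⟩)]
  | cons u U ih =>
    simp only [List.cons_append, pvPopB]
    rw [if_pos ⟨hU u (by simp), by simp; omega⟩]
    exact ih (fun x hx => hU x (List.mem_cons_of_mem u hx))

-- the scan consumes the prefix before a greedy pick m and lands on stack m :: B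
theorem pvScan_step (ys : List String) (U B : List String) (m : String) (rest : List String)
    (hU : ∀ u ∈ U, u < m) (hys : ∀ y ∈ ys, y < m)
    (hby : ∀ b B', B = b :: B' → (∀ y ∈ ys, y ≤ b) ∧ (12 ≤ B.length + rest.length → m ≤ b))
    (hrest : 12 ≤ B.length + 1 + rest.length) :
    pvScanB (U ++ B) (ys ++ m :: rest) = pvScanB (m :: B) rest := by
  induction ys generalizing U with
  | nil =>
    simp only [List.nil_append, pvScanB]
    rw [pvPop_all U B m (rest.length + 1) hU (by omega)
      (by
        intro b B' hb
        rintro ⟨hlt, hle⟩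
        have := (hby b B' hb).2 (by simp [hb] at hle ⊢; omega)
        exact absurd hlt (not_lt.mpr this))]
  | cons y ys ih =>
    simp only [List.cons_append, pvScanB]
    obtain ⟨U', hsub, he⟩ := pvPop_protect U B y ((ys ++ m :: rest).length + 1)
      (by
        intro b B' hb hlt
        exact absurd hlt (not_lt.mpr ((hby b B' hb).1 y (by simp))))
    rw [he, show y :: (U' ++ B) = (y :: U') ++ B from rfl]
    exact ih (y :: U')
      (by
        intro u hu
        rcases List.mem_cons.mp hu with h | h
        · exact h ▸ hys y (by simp)
        · exact hU u (hsub u h))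
      (fun z hz => hys z (by simp [hz]))
      (fun b B' hb => ⟨fun z hz => (hby b B' hb).1 z (by simp [hz]), (hby b B' hb).2⟩)

-- once the stack bottom can never be popped again, the scan only piles on top of it
theorem pvScan_preserve (xs : List String) (U B : List String)
    (h : ∀ b B', B = b :: B' → ∀ c ∈ xs, c ≤ b) :
    ∃ U', pvScanB (U ++ B) xs = U' ++ B := by
  induction xs generalizing U with
  | nil => exact ⟨U, rfl⟩
  | cons c cs ih =>
    simp only [pvScanB]
    obtain ⟨U', hsub, he⟩ := pvPop_protect U B c (cs.length + 1)
      (by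
        intro b B' hb hlt
        exact absurd hlt (not_lt.mpr (h b B' hb c (by simp))))
    rw [he, show c :: (U' ++ B) = (c :: U') ++ B from rfl]
    exact ih (c :: U') (fun b B' hb z hz => h b B' hb z (by simp [hz]))

-- main invariant: the stack scan extends the picks already on the stack by the greedy picks
theorem pvMain (p : Nat) (xs B : List String)
    (hx : p ≤ xs.length) (hB : B.length + p = 12)
    (hprot : ∀ b B', B = b :: B' → ∀ t (ht : t < xs.length - p), xs[t] ≤ b) :
    (pvScanB B xs).reverse.take 12 = B.reverse ++ pvGreedy p xs := by
  induction p generalizing xs B with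
  | zero =>
    obtain ⟨U', hU⟩ := pvScan_preserve xs [] B
      (by
        intro b B' hb c hc
        obtain ⟨t, ht, rfl⟩ := List.mem_iff_getElem.mp hc
        exact hprot b B' hb t (by omega))
    simp only [List.nil_append] at hU
    rw [hU, pvGreedy, List.reverse_append, List.append_nil]
    exact List.take_left' (by simp; omega)
  | succ q ih =>
    have hq : q < xs.length := by omega
    obtain ⟨hlt, hmaxw, hat, hbefore⟩ := pvPick q xs hq
    have hidxlen : pvIdx q xs < xs.length := by omega
    have hxs : xs = xs.take (pvIdx q xs) ++ xs[pvIdx q xs] :: xs.drop (pvIdx q xs + 1) := by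
      conv_lhs => rw [← List.take_append_drop (pvIdx q xs) xs]
      rw [List.getElem_cons_drop]
    have hys_len : (xs.take (pvIdx q xs)).length = pvIdx q xs := by simp; omega
    have hrest_len : (xs.drop (pvIdx q xs + 1)).length = xs.length - pvIdx q xs - 1 := by simp; omega
    have hstep : pvScanB B xs = pvScanB (xs[pvIdx q xs] :: B) (xs.drop (pvIdx q xs + 1)) := by
      conv_lhs => rw [hxs]
      rw [show B = [] ++ B from rfl]
      apply pvScan_step
      · intro u hu; cases hu
      · intro y hy
        obtain ⟨t, ht, rfl⟩ := List.mem_iff_getElem.mp hy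
        have ht' : t < pvIdx q xs := by omega
        rw [List.getElem_take]
        rw [hat hidxlen]
        exact hbefore t ht' (by omega)
      · intro b B' hb
        constructor
        · intro y hy
          obtain ⟨t, ht, rfl⟩ := List.mem_iff_getElem.mp hy
          rw [List.getElem_take]
          exact hprot b B' hb t (by omega)
        · intro hbud
          rw [hrest_len] at hbud
          have hb12 : B.length + (q + 1) = 12 := hB
          exact hat hidxlen ▸ hprot b B' hb (pvIdx q xs) (by omega)
      · rw [hrest_len]; omega
    rw [hstep]
    rw [ih (xs.drop (pvIdx q xs + 1)) (xs[pvIdx q xs] :: B)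
      (by rw [hrest_len]; omega) (by simp; omega)
      (by
        intro b B' hb t ht
        injection hb with hb1 hb2
        rw [hrest_len] at ht
        rw [List.getElem_drop]
        rw [← hb1, hat hidxlen]
        exact hmaxw (pvIdx q xs + 1 + t) (by omega))]
    rw [show pvGreedy (q + 1) xs = pvBig q xs :: pvGreedy q (xs.drop (pvIdx q xs + 1)) from rfl]
    rw [hat hidxlen, List.reverse_cons, List.append_assoc]
    rfl

-- A's loop computes the greedy picks
theorem pvA_loop (bank : List String) (p : Nat) (hp : p ≤ 12) (s : Nat) (res : String)
    (hs : s + p ≤ bank.length) :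
    ((PySem.List.pyRange (12 - (p : Int)) 12 1).foldl (pvStepA bank) (res, (s : Int))).1
      = res ++ PySem.Str.join "" (pvGreedy p (bank.drop s)) := by
  induction p generalizing s res with
  | zero =>
    rw [PySem.List.pyRange_one_eq_nil (by norm_num)]
    show res = res ++ PySem.Str.join "" []
    rw [show PySem.Str.join "" ([] : List String) = "" from rfl, String.append_empty]
  | succ q ih =>
    have hq : q < (bank.drop s).length := by simp; omega
    obtain ⟨hlt, -, -, -⟩ := pvPick q (bank.drop s) hq
    rw [PySem.List.pyRange_one_cons (by omega), List.foldl_cons]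
    have hcast : ((bank.length : Int) - (12 - (12 - ((q : Int) + 1)) - 1)) = ((bank.length - q : Nat) : Int) := by
      omega
    have havail : PySem.List.slice bank (some (s : Int)) (some ((bank.length - q : Nat) : Int))
        = pvWin q (bank.drop s) := by
      rw [PySem.List.slice_natCast]
      unfold pvWin
      congr 1
      simp
      omega
    have hstep : pvStepA bank (res, (s : Int)) (12 - ((q : Int) + 1))
        = (res ++ pvBig q (bank.drop s), ((s + pvIdx q (bank.drop s) + 1 : Nat) : Int)) := by
      show (res ++ _, _) = _
      simp only [hcast, havail]
      rw [Prod.ext_iff]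
      refine ⟨rfl, ?_⟩
      show (s : Int) + ((pvIdx q (bank.drop s) : Nat) : Int) + 1
          = ((s + pvIdx q (bank.drop s) + 1 : Nat) : Int)
      push_cast
      ring
    rw [show (12 : Int) - ((q : Int) + 1) = 12 - (q + 1 : Nat) by push_cast; ring] at hstep
    rw [hstep, show (12 : Int) - ((q + 1 : Nat) : Int) + 1 = 12 - (q : Int) by push_cast; ring]
    have hlen : (bank.drop s).length = bank.length - s := by simp
    rw [ih (by omega) (s + pvIdx q (bank.drop s) + 1) (res ++ pvBig q (bank.drop s)) (by omega)]
    rw [show pvGreedy (q + 1) (bank.drop s)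
        = pvBig q (bank.drop s) :: pvGreedy q ((bank.drop s).drop (pvIdx q (bank.drop s) + 1)) from rfl]
    rw [pvJoin_cons, List.drop_drop, ← String.append_assoc]
    congr 2

-- ===== VERDICT (by name: the statement is the Claim_ definition above) =====
theorem pick_largest_comb_spec : Claim_equal_pick_largest_comb := by
  intro bank _ hpre
  unfold Spec_pick_largest_comb pick_largest_comb pick_largest_comb_alt
  have hA := pvA_loop bank 12 (by omega) 0 "" (by simpa using hpre)
  have hB := pvMain 12 bank [] (by simpa using hpre) (by simp) (by intro b B' h; cases h)
  norm_num at hA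
  rw [hA, hB]
  simp
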